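-- pv_equiv track=rewrite | github.com/saiprabhakar/automating_oo5_jmir | utils.py | cluster_numbers
-- ===== SOURCE A (Python) =====
-- def cluster_numbers(numbers, threshold):
--     """
--     Clusters numbers that are within `threshold` of each other
--     """
--     clusters = []
--     current_cluster = []
--     # Sort the numbers in ascending order
--     numbers.sort()
--     # cluster number within threshold
--     for i in range(len(numbers)):
--         if not current_cluster:
--             current_cluster.append(numbers[i])
--         else:
--             if numbers[i] - current_cluster[-1] <= threshold:
--                 current_cluster.append(numbers[i])
--             else:
--                 clusters.append(current_cluster.copy())
--                 current_cluster = [numbers[i]]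
--     # consider the last cluster that was not appended
--     if current_cluster:
--         clusters.append(current_cluster)
--     return clusters
-- ===== SOURCE B (Python) =====
-- def cluster_numbers(numbers, threshold):
--     """
--     Clusters numbers that are within `threshold` of each other
--     """
--     # Sort the numbers in ascending order (same in-place mutation as the original)
--     numbers.sort()
--     if not numbers:
--         return []
--     n = len(numbers)
--     # stage 1: find the split indices (where the adjacent gap exceeds the threshold)
--     cuts = [i for i in range(1, n) if numbers[i] - numbers[i - 1] > threshold]
--     # stage 2: partition the sorted list into slices at those split points
--     clusters = []
--     prev = 0
--     for cut in cuts + [n]: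
--         clusters.append(numbers[prev:cut])
--         prev = cut
--     return clusters
-- ===== Notes on version B (the rewrite author's own statement) =====
-- stated objective: alternative
-- what changed: Instead of A's single greedy pass maintaining a growing current-cluster accumulator, B first computes the list of split indices (adjacent gaps exceeding the threshold) in one pass and then partitions the sorted list into contiguous slices at those cut points in a second pass; no per-element cluster state is kept.
import Mathlib
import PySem

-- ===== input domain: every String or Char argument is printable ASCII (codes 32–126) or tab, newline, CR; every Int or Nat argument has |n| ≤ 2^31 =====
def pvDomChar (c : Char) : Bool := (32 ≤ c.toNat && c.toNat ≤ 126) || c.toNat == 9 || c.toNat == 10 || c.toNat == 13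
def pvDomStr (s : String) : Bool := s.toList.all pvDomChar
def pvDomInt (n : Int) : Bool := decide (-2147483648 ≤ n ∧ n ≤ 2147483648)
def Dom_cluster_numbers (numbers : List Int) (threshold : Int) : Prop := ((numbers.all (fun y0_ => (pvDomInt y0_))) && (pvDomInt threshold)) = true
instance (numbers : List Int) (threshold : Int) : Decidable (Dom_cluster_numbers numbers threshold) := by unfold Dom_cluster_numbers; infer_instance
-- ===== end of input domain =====

-- B replaces A's single greedy pass with a pending current-cluster accumulator by two staged
-- passes: first compute the split indices (adjacent gaps > threshold), then partition the sorted
-- list into slices at those cut points (objective: alternative decomposition).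
-- Both Pythons sort `numbers` in place; the equivalence proved here is about the return value.

-- ===== PORT A =====
-- final flush: `if current_cluster: clusters.append(current_cluster)`
def pvFinishA (st : List (List Int) × List Int) : List (List Int) :=
  if st.2.isEmpty then st.1 else st.1 ++ [st.2]

-- one iteration of A's `for i in range(len(numbers))` loop body, state = (clusters, current_cluster)
def pvStepA (threshold : Int) (st : List (List Int) × List Int) (x : Int) :
    List (List Int) × List Int :=
  if st.2.isEmpty then (st.1, st.2 ++ [x])
  else
    match PySem.List.pyGet? st.2 (-1) with
    | some last =>
        if x - last ≤ threshold then (st.1, st.2 ++ [x])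
        else (st.1 ++ [st.2], [x])
    | none => (st.1, st.2)   -- unreachable: st.2 is nonempty on this branch

def cluster_numbers (numbers : List Int) (threshold : Int) : List (List Int) :=
  let s := PySem.List.sorted numbers (fun x => x) false
  pvFinishA (s.foldl (pvStepA threshold) ([], []))

-- ===== PORT B =====
def cluster_numbers_alt (numbers : List Int) (threshold : Int) : List (List Int) :=
  let s := PySem.List.sorted numbers (fun x => x) false
  if s.isEmpty then [] else
    let n : Int := s.length
    -- cuts = [i for i in range(1, n) if numbers[i] - numbers[i - 1] > threshold]
    let cuts := (PySem.List.pyRange 1 n 1).filter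
      (fun i => decide (PySem.List.pyGetD s i 0 - PySem.List.pyGetD s (i-1) 0 > threshold))
    -- for cut in cuts + [n]: clusters.append(numbers[prev:cut]); prev = cut
    ((cuts ++ [n]).foldl
      (fun st cut => (st.1 ++ [PySem.List.slice s (some st.2) (some cut)], cut))
      (([] : List (List Int)), (0 : Int))).1

-- ===== PRECONDITION & SPEC =====
def Spec_cluster_numbers (numbers : List Int) (threshold : Int) (out : List (List Int)) : Prop := out = cluster_numbers_alt numbers threshold
instance (numbers : List Int) (threshold : Int) (out : List (List Int)) : Decidable (Spec_cluster_numbers numbers threshold out) := by unfold Spec_cluster_numbers; infer_instance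

-- ===== CLAIM (what is proved, stated in full; the proofs are below) =====
def Claim_equal_cluster_numbers : Prop := ∀ (numbers : List Int) (threshold : Int), Dom_cluster_numbers numbers threshold → Spec_cluster_numbers numbers threshold (cluster_numbers numbers threshold)

-- ===== LEMMAS AND PROOFS =====

-- the common reference: one structural-recursion step grouping adjacent elements (proof-only)
def pvStepB (threshold : Int) (x : Int) (clusters : List (List Int)) : List (List Int) :=
  match clusters with
  | (h :: c) :: rest =>
      if h - x ≤ threshold then (x :: h :: c) :: rest
      else [x] :: (h :: c) :: rest
  | _ => [x] :: clusters

-- Nat-indexed versions of B's two stages (proof-only)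
def pvNatCuts (t : Int) : List Int → List Nat
  | [] => []
  | [_] => []
  | x :: y :: r => (if y - x > t then [1] else []) ++ (pvNatCuts t (y :: r)).map (· + 1)

def pvNatChop (s : List Int) (prev : Nat) : List Nat → List (List Int)
  | [] => []
  | c :: cs => (s.drop prev).take (c - prev) :: pvNatChop s c cs

def pvChop (s : List Int) (prev : Int) : List Int → List (List Int)
  | [] => []
  | c :: cs => PySem.List.slice s (some prev) (some c) :: pvChop s c cs

-- ===== A-side: A's fold equals the foldr of pvStepB =====

theorem pvB_nonempty (t : Int) (s : List Int) :
    ∀ c ∈ s.foldr (pvStepB t) [], c ≠ [] := by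
  induction s with
  | nil => simp
  | cons x xs ih =>
    intro c hc
    simp only [List.foldr] at hc
    generalize hfr : List.foldr (pvStepB t) [] xs = r at hc ih
    unfold pvStepB at hc
    cases r with
    | nil => simp at hc; simp [hc]
    | cons d rest =>
      cases d with
      | nil =>
        simp at hc
        rcases hc with h | h | h
        · simp [h]
        · exact absurd rfl (ih [] List.mem_cons_self)
        · exact ih c (List.mem_cons_of_mem _ h)
      | cons h0 d' =>
        by_cases h2 : h0 - x ≤ t
        · simp [h2] at hc
          rcases hc with h | h
          · simp [h]
          · exact ih c (List.mem_cons_of_mem _ h)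
        · simp [h2] at hc
          rcases hc with h | h | h
          · simp [h]
          · exact ih c (by simp [h])
          · exact ih c (by simp [h])

theorem pvA_step_factor (t : Int) (cl : List (List Int)) (cur : List Int) (x : Int) :
    pvStepA t (cl, cur) x =
      (cl ++ (pvStepA t (([] : List (List Int)), cur) x).1,
       (pvStepA t (([] : List (List Int)), cur) x).2) := by
  unfold pvStepA
  by_cases h1 : cur.isEmpty
  · simp [h1]
  · rw [if_neg h1, if_neg h1]
    cases hg : PySem.List.pyGet? cur (-1) with
    | none => simp
    | some last =>
      by_cases h2 : x - last ≤ t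
      · simp [h2]
      · simp [h2]

theorem pvA_factor (t : Int) (s : List Int) :
    ∀ cl cur, s.foldl (pvStepA t) (cl, cur) =
      (cl ++ (s.foldl (pvStepA t) (([] : List (List Int)), cur)).1,
       (s.foldl (pvStepA t) (([] : List (List Int)), cur)).2) := by
  induction s with
  | nil => intro cl cur; simp
  | cons x xs ih =>
    intro cl cur
    simp only [List.foldl]
    rw [pvA_step_factor t cl cur x]
    rcases hA : pvStepA t (([] : List (List Int)), cur) x with ⟨a1, a2⟩
    dsimp only
    rw [ih (cl ++ a1) a2, ih a1 a2]
    simp [List.append_assoc]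

theorem pvFinishA_append (cl a : List (List Int)) (b : List Int) :
    pvFinishA (cl ++ a, b) = cl ++ pvFinishA (a, b) := by
  unfold pvFinishA; split <;> simp

theorem pvA_step_last (t : Int) (p : List Int) (z x : Int) :
    pvStepA t (([] : List (List Int)), p ++ [z]) x =
      (if x - z ≤ t then (([] : List (List Int)), (p ++ [z]) ++ [x])
       else ([p ++ [z]], [x])) := by
  unfold pvStepA
  simp [PySem.List.pyGet?_neg_one_append_singleton]

theorem pvMain (t : Int) (s : List Int) :
    ∀ p z, pvFinishA (s.foldl (pvStepA t) (([] : List (List Int)), p ++ [z])) =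
      (match s.foldr (pvStepB t) [] with
       | (h :: d) :: rest =>
           if h - z ≤ t then ((p ++ [z]) ++ h :: d) :: rest
           else (p ++ [z]) :: (h :: d) :: rest
       | _ => [p ++ [z]]) := by
  induction s with
  | nil => intro p z; simp [pvFinishA]
  | cons x xs ih =>
    intro p z
    simp only [List.foldl, List.foldr]
    rw [pvA_step_last]
    by_cases hxz : x - z ≤ t
    · rw [if_pos hxz]
      have h3 := ih (p ++ [z]) x
      rw [h3]
      generalize hr : List.foldr (pvStepB t) [] xs = r
      cases r with
      | nil => simp [pvStepB, hxz]
      | cons d rest =>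
        cases d with
        | nil =>
          exact absurd rfl (pvB_nonempty t xs [] (by rw [hr]; exact List.mem_cons_self))
        | cons h0 d' =>
          by_cases h2 : h0 - x ≤ t <;> simp [pvStepB, h2, hxz, List.append_assoc]
    · rw [if_neg hxz]
      rw [pvA_factor t xs [p ++ [z]] [x], pvFinishA_append]
      have h3 := ih [] x
      simp only [List.nil_append] at h3
      rw [h3]
      generalize hr : List.foldr (pvStepB t) [] xs = r
      cases r with
      | nil => simp [pvStepB, hxz]
      | cons d rest =>
        cases d with
        | nil =>
          exact absurd rfl (pvB_nonempty t xs [] (by rw [hr]; exact List.mem_cons_self))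
        | cons h0 d' =>
          by_cases h2 : h0 - x ≤ t <;> simp [pvStepB, h2, hxz]

theorem pvA_eq_foldrB (numbers : List Int) (t : Int) :
    cluster_numbers numbers t =
      (PySem.List.sorted numbers (fun x => x) false).foldr (pvStepB t) [] := by
  unfold cluster_numbers
  cases hs : PySem.List.sorted numbers (fun x => x) false with
  | nil => simp [pvFinishA]
  | cons x s' =>
    simp only [List.foldl, List.foldr]
    have h0 : pvStepA t (([] : List (List Int)), []) x = ([], [] ++ [x]) := by
      unfold pvStepA; simp
    rw [h0]
    rw [pvMain t s' [] x]
    generalize hr : List.foldr (pvStepB t) [] s' = r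
    cases r with
    | nil => simp [pvStepB]
    | cons d rest =>
      cases d with
      | nil =>
        exact absurd rfl (pvB_nonempty t s' [] (by rw [hr]; exact List.mem_cons_self))
      | cons h0 d' =>
        by_cases h2 : h0 - x ≤ t <;> simp [pvStepB, h2]

-- ===== B-side: the cuts-and-slices construction equals the same foldr =====

theorem pvNatCuts_pos (t : Int) (s : List Int) : ∀ c ∈ pvNatCuts t s, 1 ≤ c := by
  induction s with
  | nil => simp [pvNatCuts]
  | cons x s ih =>
    cases s with
    | nil => simp [pvNatCuts]
    | cons y r =>
      intro c hc
      unfold pvNatCuts at hc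
      rcases List.mem_append.1 hc with h | h
      · split at h <;> simp_all
      · rcases List.mem_map.1 h with ⟨k, _, hk⟩; omega

-- the first cluster of the foldr starts with the list's first element
theorem pvB_head (t : Int) (y : Int) (r : List Int) :
    ∃ d rest, (y :: r).foldr (pvStepB t) [] = (y :: d) :: rest := by
  simp only [List.foldr]
  generalize List.foldr (pvStepB t) [] r = w
  unfold pvStepB
  cases w with
  | nil => exact ⟨[], [], rfl⟩
  | cons d rest =>
    cases d with
    | nil => exact ⟨[], [] :: rest, rfl⟩
    | cons h0 d' =>
      by_cases h2 : h0 - y ≤ t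
      · exact ⟨h0 :: d', rest, by simp [h2]⟩
      · exact ⟨[], (h0 :: d') :: rest, by simp [h2]⟩

theorem pvNatChop_shift (x : Int) (s : List Int) :
    ∀ (l : List Nat) (p : Nat), pvNatChop (x :: s) (p + 1) (l.map (· + 1)) = pvNatChop s p l := by
  intro l
  induction l with
  | nil => intro p; simp [pvNatChop]
  | cons c cs ih =>
    intro p
    rw [List.map_cons]
    unfold pvNatChop
    rw [List.drop_succ_cons, ih c]
    have h : c + 1 - (p + 1) = c - p := by omega
    rw [h]

-- one unfolding step of pvNatChop
theorem pvNatChop_cons (s2 : List Int) (p c : Nat) (cs : List Nat) :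
    pvNatChop s2 p (c :: cs) = (s2.drop p).take (c - p) :: pvNatChop s2 c cs := rfl

theorem pvNatMain (t : Int) (s : List Int) (hs : s ≠ []) :
    pvNatChop s 0 (pvNatCuts t s ++ [s.length]) = s.foldr (pvStepB t) [] := by
  induction s with
  | nil => exact absurd rfl hs
  | cons x s' ih =>
    cases s' with
    | nil => simp [pvNatCuts, pvNatChop, pvStepB]
    | cons y r =>
      have ihy := ih (by simp)
      obtain ⟨c0, l', hsplit⟩ :
          ∃ c0 l', pvNatCuts t (y :: r) ++ [(y :: r).length] = c0 :: l' := by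
        cases pvNatCuts t (y :: r) with
        | nil => exact ⟨_, _, rfl⟩
        | cons a as => exact ⟨a, as ++ [(y :: r).length], rfl⟩
      have hc0 : 1 ≤ c0 := by
        have hmem : c0 ∈ pvNatCuts t (y :: r) ++ [(y :: r).length] := by
          rw [hsplit]; exact List.mem_cons_self
        rcases List.mem_append.1 hmem with h | h
        · exact pvNatCuts_pos t _ c0 h
        · simp at h; subst h; simp
      have hcuts : pvNatCuts t (x :: y :: r) =
          (if y - x > t then [1] else []) ++ (pvNatCuts t (y :: r)).map (· + 1) := rfl
      have hlen : (x :: y :: r).length = (y :: r).length + 1 := rfl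
      have hlist : (pvNatCuts t (y :: r)).map (· + 1) ++ [(y :: r).length + 1]
          = ((pvNatCuts t (y :: r)) ++ [(y :: r).length]).map (· + 1) := by simp
      have hshift := pvNatChop_shift x (y :: r)
      rw [hcuts, hlen]
      by_cases hcut : y - x > t
      · rw [if_pos hcut]
        simp only [List.cons_append, List.nil_append]
        rw [hlist, pvNatChop_cons]
        have h1 := hshift (pvNatCuts t (y :: r) ++ [(y :: r).length]) 0
        simp only [Nat.zero_add] at h1
        rw [h1, ihy]
        obtain ⟨d, rest, hhd⟩ := pvB_head t y r
        conv_rhs => rw [List.foldr_cons]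
        rw [hhd]
        have hnle : ¬ (y - x ≤ t) := by omega
        simp [pvStepB, hnle]
      · rw [if_neg hcut]
        simp only [List.nil_append]
        rw [hlist, hsplit, List.map_cons, pvNatChop_cons]
        have h1 := hshift l' c0
        rw [h1]
        rw [hsplit, pvNatChop_cons] at ihy
        obtain ⟨k, hk⟩ : ∃ k, c0 = k + 1 := ⟨c0 - 1, by omega⟩
        subst hk
        simp only [List.drop_zero, Nat.sub_zero, List.take_succ_cons] at ihy ⊢
        conv_rhs => rw [List.foldr_cons]
        rw [← ihy]
        have hle : y - x ≤ t := by omega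
        simp [pvStepB, hle]

theorem pvRange_shift (a b : Int) :
    PySem.List.pyRange (a + 1) (b + 1) 1 = (PySem.List.pyRange a b 1).map (· + 1) := by
  rw [PySem.List.pyRange_one, PySem.List.pyRange_one, List.map_map]
  have h : (b + 1 - (a + 1)).toNat = (b - a).toNat := by omega
  rw [h]
  apply List.map_congr_left
  intro k _
  simp only [Function.comp_apply]
  ring

theorem pvCuts_eq_natCuts (t : Int) (s : List Int) :
    (PySem.List.pyRange 1 (s.length : Int) 1).filter
      (fun i => decide (PySem.List.pyGetD s i 0 - PySem.List.pyGetD s (i-1) 0 > t))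
      = (pvNatCuts t s).map (fun k => Int.ofNat k) := by
  induction s with
  | nil => simp [pvNatCuts, PySem.List.pyRange_one_eq_nil]
  | cons x s' ih =>
    cases s' with
    | nil => simp [pvNatCuts, PySem.List.pyRange_one_eq_nil]
    | cons y r =>
      have hn' : (1 : Int) ≤ ((y :: r).length : Int) := by
        have : (y :: r).length = r.length + 1 := rfl
        omega
      have hn : ((x :: y :: r).length : Int) = ((y :: r).length : Int) + 1 := by
        simp
      rw [hn, PySem.List.pyRange_one_cons (by omega), pvRange_shift, List.filter_cons]
      have hx1 : PySem.List.pyGetD (x :: y :: r) (1 : Int) 0 = y := by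
        rw [show (1 : Int) = ((1 : Nat) : Int) from rfl, PySem.List.pyGetD_natCast]; rfl
      have hx0 : PySem.List.pyGetD (x :: y :: r) ((1 : Int) - 1) 0 = x := by
        rw [show (1 : Int) - 1 = ((0 : Nat) : Int) from rfl, PySem.List.pyGetD_natCast]; rfl
      have htail : (((PySem.List.pyRange 1 ((y :: r).length : Int) 1).map (· + 1)).filter
            (fun i => decide (PySem.List.pyGetD (x :: y :: r) i 0
              - PySem.List.pyGetD (x :: y :: r) (i - 1) 0 > t)))
          = ((pvNatCuts t (y :: r)).map (· + 1)).map (fun k => Int.ofNat k) := by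
        rw [List.filter_map]
        have hcongr : ∀ i ∈ PySem.List.pyRange 1 ((y :: r).length : Int) 1,
            ((fun i => decide (PySem.List.pyGetD (x :: y :: r) i 0
              - PySem.List.pyGetD (x :: y :: r) (i - 1) 0 > t)) ∘ (· + 1)) i
            = (fun i => decide (PySem.List.pyGetD (y :: r) i 0
              - PySem.List.pyGetD (y :: r) (i - 1) 0 > t)) i := by
          intro i hi
          obtain ⟨hi1, hi2⟩ := (PySem.List.mem_pyRange_one).1 hi
          obtain ⟨k, hk1, hk⟩ : ∃ k : Nat, 1 ≤ k ∧ i = (k : Int) :=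
            ⟨i.toNat, by omega, by omega⟩
          subst hk
          have e1 : ((k : Int) + 1) = (((k + 1 : Nat)) : Int) := by push_cast; ring
          have e2 : (((k + 1 : Nat)) : Int) - 1 = ((k : Nat) : Int) := by push_cast; ring
          have e3 : ((k : Int) - 1) = (((k - 1 : Nat)) : Int) := by omega
          simp only [Function.comp_apply, e1, e2, e3, PySem.List.pyGetD_natCast]
          have g1 : (x :: y :: r).getD (k + 1) 0 = (y :: r).getD k 0 := rfl
          have g2 : (x :: y :: r).getD k 0 = (y :: r).getD (k - 1) 0 := by
            obtain ⟨m, hm⟩ : ∃ m, k = m + 1 := ⟨k - 1, by omega⟩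
            subst hm; simp
          rw [g1, g2]
        rw [List.filter_congr hcongr, ih, List.map_map, List.map_map]
        apply List.map_congr_left
        intro c _
        simp only [Function.comp_apply, Int.ofNat_eq_natCast]
        omega
      by_cases hcut : y - x > t
      · have hd : (decide (PySem.List.pyGetD (x :: y :: r) (1 : Int) 0
            - PySem.List.pyGetD (x :: y :: r) ((1 : Int) - 1) 0 > t)) = true := by
          rw [hx1, hx0]; simpa using hcut
        simp only [hd, if_true, htail]
        have hrcuts : pvNatCuts t (x :: y :: r) =
            (if y - x > t then [1] else []) ++ (pvNatCuts t (y :: r)).map (· + 1) := rfl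
        rw [hrcuts, if_pos hcut, List.singleton_append, List.map_cons]
        simp
      · have hd : (decide (PySem.List.pyGetD (x :: y :: r) (1 : Int) 0
            - PySem.List.pyGetD (x :: y :: r) ((1 : Int) - 1) 0 > t)) = false := by
          rw [hx1, hx0]; simpa using hcut
        simp only [hd, Bool.false_eq_true, if_false, htail]
        have hrcuts : pvNatCuts t (x :: y :: r) =
            (if y - x > t then [1] else []) ++ (pvNatCuts t (y :: r)).map (· + 1) := rfl
        rw [hrcuts, if_neg hcut, List.nil_append]

theorem pvFoldl_chop (s : List Int) :
    ∀ (l : List Int) (acc : List (List Int)) (p : Int),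
      (l.foldl (fun st cut => (st.1 ++ [PySem.List.slice s (some st.2) (some cut)], cut)) (acc, p)).1
        = acc ++ pvChop s p l := by
  intro l
  induction l with
  | nil => intro acc p; simp [pvChop]
  | cons c cs ih =>
    intro acc p
    simp only [List.foldl, pvChop, ih]
    simp

theorem pvChop_cast (s : List Int) :
    ∀ (l : List Nat) (p : Nat), pvChop s (p : Int) (l.map (fun k => Int.ofNat k)) = pvNatChop s p l := by
  intro l
  induction l with
  | nil => intro p; simp [pvChop, pvNatChop]
  | cons c cs ih =>
    intro p
    rw [List.map_cons]
    unfold pvChop pvNatChop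
    rw [show Int.ofNat c = (c : Int) from rfl, ih c, PySem.List.slice_natCast]

theorem pvAlt_eq_foldrB (numbers : List Int) (t : Int) :
    cluster_numbers_alt numbers t =
      (PySem.List.sorted numbers (fun x => x) false).foldr (pvStepB t) [] := by
  unfold cluster_numbers_alt
  cases hs : PySem.List.sorted numbers (fun x => x) false with
  | nil => simp
  | cons x s' =>
    simp only [List.isEmpty_cons, if_neg Bool.false_ne_true]
    rw [pvFoldl_chop, List.nil_append, pvCuts_eq_natCuts]
    have h1 : [((x :: s').length : Int)] = [(x :: s').length].map (fun k => Int.ofNat k) := rfl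
    rw [h1, ← List.map_append]
    rw [show (0 : Int) = ((0 : Nat) : Int) from rfl, pvChop_cast]
    exact pvNatMain t (x :: s') (by simp)

-- ===== VERDICT (by name: the statement is the Claim_ definition above) =====
theorem cluster_numbers_spec : Claim_equal_cluster_numbers := by
  intro numbers t _
  unfold Spec_cluster_numbers
  rw [pvA_eq_foldrB, pvAlt_eq_foldrB]
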